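-- pv_equiv track=rewrite | github.com/MrBrantCode/unitest_baseline | mut_generate/mist_train_cf/cf_68648/solution.py | sorting1DArray
-- ===== SOURCE A (Python) =====
-- def sorting1DArray(arr):
--     # Check if 'arr' is a nested list
--     if isinstance(arr[0], list):
--         # If true, flatten the list
--         arr = [num for sublist in arr for num in sublist]
--
--     for i in range(len(arr)):
--         for j in range(i+1, len(arr)):
--             if arr[i] > arr[j]:
--                 temp = arr[i]
--                 arr[i] = arr[j]
--                 arr[j] = temp
--
--     return arr
-- ===== SOURCE B (Python) =====
-- # Merge sort (divide and conquer) instead of A's quadratic swap loops; mutates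
-- # arr in place via arr[:] like A. On empty input A raises IndexError, B returns [].
-- def _merge(xs, ys):
--     out = []
--     i = j = 0
--     while i < len(xs) and j < len(ys):
--         if xs[i] <= ys[j]:
--             out.append(xs[i]); i += 1
--         else:
--             out.append(ys[j]); j += 1
--     out.extend(xs[i:])
--     out.extend(ys[j:])
--     return out
--
-- def _msort(xs):
--     if len(xs) <= 1:
--         return list(xs)
--     mid = len(xs) // 2
--     return _merge(_msort(xs[:mid]), _msort(xs[mid:]))
--
-- def sorting1DArray(arr):
--     if arr and isinstance(arr[0], list):
--         arr = [num for sublist in arr for num in sublist]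
--     arr[:] = _msort(arr)
--     return arr
-- ===== Notes on version B (the rewrite author's own statement) =====
-- stated objective: faster
-- what changed: Replaced the quadratic nested swap loops with a recursive merge sort (split in half, recurse, merge ascending), writing the result back into the list in place; Pre_ excludes only the empty list, on which A raises IndexError while probing the first element for its nested-list check.
import Mathlib
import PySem

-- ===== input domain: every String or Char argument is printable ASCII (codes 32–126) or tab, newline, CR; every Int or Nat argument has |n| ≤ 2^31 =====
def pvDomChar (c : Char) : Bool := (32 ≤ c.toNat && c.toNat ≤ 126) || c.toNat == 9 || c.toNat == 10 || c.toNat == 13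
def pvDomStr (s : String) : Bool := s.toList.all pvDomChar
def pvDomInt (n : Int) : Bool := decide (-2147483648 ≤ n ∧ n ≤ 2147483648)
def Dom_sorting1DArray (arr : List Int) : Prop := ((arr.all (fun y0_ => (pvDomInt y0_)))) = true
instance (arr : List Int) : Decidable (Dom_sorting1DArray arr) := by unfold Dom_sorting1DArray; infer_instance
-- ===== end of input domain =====

-- B replaces A's quadratic nested swap loops by a recursive merge sort; the Python B
-- mutates the argument list in place just like A, so the two agree on side effects too.

-- ===== PORT A =====
-- inner-loop body: `if arr[i] > arr[j]: arr[i], arr[j] = arr[j], arr[i]` (indices always in range)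
def swapStep (i : Nat) (l : List Int) (j : Nat) : List Int :=
  if l.getD i 0 > l.getD j 0 then (l.set i (l.getD j 0)).set j (l.getD i 0) else l

-- `for i in range(len(arr)): for j in range(i+1, len(arr)): ...` as folds over the index ranges
def sorting1DArray (arr : List Int) : List Int :=
  (List.range arr.length).foldl
    (fun l i => (List.range' (i+1) (l.length - (i+1))).foldl (fun m j => swapStep i m j) l)
    arr

-- ===== PORT B =====
-- termination measures for the B port (cited by name in decreasing_by)
theorem merge_decL (xs ys : List Int) (y : Int) : xs.length + (y :: ys).length < xs.length + 1 + (y :: ys).length :=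
  Nat.add_lt_add_right (Nat.lt_succ_self _) _
theorem merge_decR (xs ys : List Int) (x : Int) : (x :: xs).length + ys.length < (x :: xs).length + (ys.length + 1) :=
  Nat.add_lt_add_left (Nat.lt_succ_self _) _
theorem msort_dec_take (l : List Int) (h : ¬ l.length ≤ 1) : (l.take (l.length / 2)).length < l.length :=
  by rw [List.length_take]; omega
theorem msort_dec_drop (l : List Int) (h : ¬ l.length ≤ 1) : (l.drop (l.length / 2)).length < l.length :=
  by rw [List.length_drop]; omega

-- _merge: the two-pointer merge loop of Source B
def pvMerge : List Int → List Int → List Int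
  | [], ys => ys
  | x :: xs, [] => x :: xs
  | x :: xs, y :: ys =>
    if x ≤ y then x :: pvMerge xs (y :: ys) else y :: pvMerge (x :: xs) ys
termination_by xs ys => xs.length + ys.length
decreasing_by
  · exact merge_decL xs ys y
  · exact merge_decR xs ys x

-- _msort: split at len//2, recurse, merge
def pvMsort (l : List Int) : List Int :=
  if h : l.length ≤ 1 then l
  else
    pvMerge (pvMsort (l.take (l.length / 2))) (pvMsort (l.drop (l.length / 2)))
termination_by l.length
decreasing_by
  · exact msort_dec_take l h
  · exact msort_dec_drop l h

def sorting1DArray_alt (arr : List Int) : List Int := pvMsort arr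

-- ===== PRECONDITION & SPEC =====
-- Python A probes the first element for its nested-list check, so it raises IndexError on the empty list; Pre_ excludes exactly that input.
def Pre_sorting1DArray (arr : List Int) : Prop := arr ≠ []
instance (arr : List Int) : Decidable (Pre_sorting1DArray arr) := by unfold Pre_sorting1DArray; infer_instance
def pvWitness_sorting1DArray : List Int := [3, 1, 2]

def Spec_sorting1DArray (arr : List Int) (out : List Int) : Prop := out = sorting1DArray_alt arr
instance (arr : List Int) (out : List Int) : Decidable (Spec_sorting1DArray arr out) := by unfold Spec_sorting1DArray; infer_instance

-- ===== CLAIM (what is proved, stated in full; the proofs are below) =====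
def Claim_equal_sorting1DArray : Prop := ∀ (arr : List Int), Dom_sorting1DArray arr → Pre_sorting1DArray arr → Spec_sorting1DArray arr (sorting1DArray arr)

-- ===== LEMMAS AND PROOFS =====

-- A's inner pass, structurally: carry a candidate through the tail, swapping when bigger
def selStep : Int → List Int → Int × List Int
  | c, [] => (c, [])
  | c, x :: xs =>
    if c > x then ((selStep x xs).1, c :: (selStep x xs).2)
    else ((selStep c xs).1, x :: (selStep c xs).2)

theorem selStep_length (c : Int) (xs : List Int) : (selStep c xs).2.length = xs.length := by
  induction xs generalizing c with
  | nil => rfl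
  | cons x xs ih => simp only [selStep]; split <;> simp [ih]

theorem selStep_perm (c : Int) (xs : List Int) :
    List.Perm ((selStep c xs).1 :: (selStep c xs).2) (c :: xs) := by
  induction xs generalizing c with
  | nil => rfl
  | cons x xs ih =>
    simp only [selStep]; split
    · exact (List.Perm.swap c _ _).trans ((ih x).cons c)
    · exact ((List.Perm.swap x _ _).trans ((ih c).cons x)).trans (List.Perm.swap c x xs)

theorem selStep_min (c : Int) (xs : List Int) :
    (selStep c xs).1 ≤ c ∧ ∀ y ∈ (selStep c xs).2, (selStep c xs).1 ≤ y := by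
  induction xs generalizing c with
  | nil => exact ⟨le_refl c, by simp [selStep]⟩
  | cons x xs ih =>
    simp only [selStep]; split
    · rename_i h
      obtain ⟨h1, h2⟩ := ih x
      exact ⟨h1.trans (le_of_lt h), by
        intro y hy; rcases List.mem_cons.mp hy with rfl | hy
        · exact h1.trans (le_of_lt h)
        · exact h2 y hy⟩
    · rename_i h
      obtain ⟨h1, h2⟩ := ih c
      exact ⟨h1, by
        intro y hy; rcases List.mem_cons.mp hy with rfl | hy
        · exact h1.trans (by omega)
        · exact h2 y hy⟩

theorem ssort_dec (c : Int) (xs : List Int) : (selStep c xs).2.length < (c :: xs).length := by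
  rw [selStep_length]; exact Nat.lt_succ_self _

-- selection sort as a structural recursion (the shape A's loops compute)
def ssort : List Int → List Int
  | [] => []
  | c :: xs => (selStep c xs).1 :: ssort (selStep c xs).2
termination_by l => l.length
decreasing_by exact ssort_dec c xs

theorem ssort_perm (l : List Int) : List.Perm (ssort l) l := by
  induction l using ssort.induct with
  | case1 => rw [ssort]
  | case2 c xs ih => rw [ssort]; exact (ih.cons _).trans (selStep_perm c xs)

theorem ssort_sorted (l : List Int) : List.Pairwise (· ≤ ·) (ssort l) := by
  induction l using ssort.induct with
  | case1 => rw [ssort]; exact List.Pairwise.nil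
  | case2 c xs ih =>
    rw [ssort]
    refine List.pairwise_cons.mpr ⟨?_, ih⟩
    intro b hb
    have hb' : b ∈ (selStep c xs).2 := ((ssort_perm _).mem_iff).mp hb
    exact (selStep_min c xs).2 b hb'

theorem getD_eq_get (l : List Int) (i : Nat) (h : i < l.length) : l.getD i 0 = l[i] := by
  simp [List.getD_eq_getElem?_getD, List.getElem?_eq_getElem h]

theorem drop_cons_getD (l : List Int) (j : Nat) (h : j < l.length) :
    l.drop j = l.getD j 0 :: l.drop (j+1) := by
  rw [List.drop_eq_getElem_cons h, getD_eq_get l j h]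

theorem take_succ_getD (l : List Int) (j : Nat) (h : j < l.length) :
    l.take (j+1) = l.take j ++ [l.getD j 0] := by
  rw [List.take_succ_eq_append_getElem h, getD_eq_get l j h]

-- inner bridge: the j-fold from position j equals prefix-with-candidate ++ selStep on the suffix
theorem inner_bridge (i : Nat) : ∀ (k j : Nat) (l : List Int), i < j → j + k = l.length →
    (List.range' j k).foldl (fun m j' => swapStep i m j') l
      = ((l.take j).set i (selStep (l.getD i 0) (l.drop j)).1) ++ (selStep (l.getD i 0) (l.drop j)).2 := by
  intro k
  induction k with
  | zero =>
    intro j l hij hlen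
    have hj : j = l.length := by omega
    subst hj
    simp only [List.range', List.foldl_nil, List.drop_length, selStep, List.take_length,
      List.append_nil]
    rw [getD_eq_get l i (by omega), List.set_getElem_self]
  | succ k ih =>
    intro j l hij hlen
    have hj : j < l.length := by omega
    have hi : i < l.length := by omega
    rw [List.range'_succ, List.foldl_cons]
    show (List.range' (j+1) k).foldl _ (swapStep i l j) = _
    rw [drop_cons_getD l j hj, swapStep]
    by_cases h : l.getD i 0 > l.getD j 0
    · rw [if_pos h]
      simp only [selStep, if_pos h]
      have hlen' : ((l.set i (l.getD j 0)).set j (l.getD i 0)).length = l.length := by simp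
      have hIH := ih (j+1) ((l.set i (l.getD j 0)).set j (l.getD i 0)) (by omega) (by omega)
      rw [hIH]
      have hgd : ((l.set i (l.getD j 0)).set j (l.getD i 0)).getD i 0 = l.getD j 0 := by
        rw [getD_eq_get _ i (by simpa using hi)]
        rw [List.getElem_set_ne (show j ≠ i by omega), List.getElem_set_self]
      have hdrop : ((l.set i (l.getD j 0)).set j (l.getD i 0)).drop (j+1) = l.drop (j+1) := by
        rw [List.drop_set_of_lt (by omega), List.drop_set_of_lt (by omega)]
      have htake : ((l.set i (l.getD j 0)).set j (l.getD i 0)).take (j+1)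
          = ((l.take (j+1)).set i (l.getD j 0)).set j (l.getD i 0) := by
        rw [List.take_set, List.take_set]
      rw [hgd, hdrop, htake]
      rw [List.set_comm _ _ (show j ≠ i by omega), List.set_set]
      rw [take_succ_getD l j hj]
      rw [List.set_append_left _ _ (by simp; omega)]
      rw [List.set_append_right _ _ (by simp [Nat.min_eq_left hj.le])]
      have h0 : j - ((List.take j l).set i (selStep (l.getD j 0) (List.drop (j+1) l)).1).length = 0 := by
        simp only [List.length_set, List.length_take]; omega
      rw [h0]
      simp
    · rw [if_neg h]
      simp only [selStep, if_neg h]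
      have hIH := ih (j+1) l (by omega) (by omega)
      rw [hIH, take_succ_getD l j hj]
      rw [List.set_append_left _ _ (by simp; omega)]
      simp

-- outer bridge
theorem outer_bridge : ∀ (k j : Nat) (l : List Int), j + k = l.length →
    (List.range' j k).foldl
      (fun l i => (List.range' (i+1) (l.length - (i+1))).foldl (fun m j' => swapStep i m j') l) l
      = l.take j ++ ssort (l.drop j) := by
  intro k
  induction k with
  | zero =>
    intro j l hlen
    have hj : j = l.length := by omega
    subst hj
    simp only [List.range', List.foldl_nil, List.drop_length, List.take_length]
    rw [ssort]
    simp
  | succ k ih =>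
    intro j l hlen
    have hj : j < l.length := by omega
    rw [List.range'_succ, List.foldl_cons]
    have hk : l.length - (j+1) = k := by omega
    rw [hk]
    rw [inner_bridge j k (j+1) l (by omega) (by omega)]
    rw [take_succ_getD l j hj]
    rw [List.set_append_right _ _ (by simp only [List.length_take]; omega)]
    have hstate : l.take j ++ [l.getD j 0].set ((j : Nat) - (l.take j).length) (selStep (l.getD j 0) (l.drop (j+1))).1 ++ (selStep (l.getD j 0) (l.drop (j+1))).2
        = (l.take j ++ [(selStep (l.getD j 0) (l.drop (j+1))).1]) ++ (selStep (l.getD j 0) (l.drop (j+1))).2 := by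
      have h0 : (j : Nat) - (l.take j).length = 0 := by simp only [List.length_take]; omega
      rw [h0]
      simp
    rw [hstate, List.append_assoc]
    have hlen2 : ((l.take j ++ ([(selStep (l.getD j 0) (l.drop (j+1))).1] ++ (selStep (l.getD j 0) (l.drop (j+1))).2))).length = l.length := by
      simp [selStep_length]
      omega
    rw [ih (j+1) _ (by rw [hlen2]; omega)]
    have htk : (l.take j ++ ([(selStep (l.getD j 0) (l.drop (j+1))).1] ++ (selStep (l.getD j 0) (l.drop (j+1))).2)).take (j+1)
        = l.take j ++ [(selStep (l.getD j 0) (l.drop (j+1))).1] := by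
      rw [← List.append_assoc]
      exact List.take_left' (by simp; omega)
    have hdr : (l.take j ++ ([(selStep (l.getD j 0) (l.drop (j+1))).1] ++ (selStep (l.getD j 0) (l.drop (j+1))).2)).drop (j+1)
        = (selStep (l.getD j 0) (l.drop (j+1))).2 := by
      rw [← List.append_assoc]
      exact List.drop_left' (by simp; omega)
    rw [htk, hdr]
    rw [drop_cons_getD l j hj, ssort]
    simp

theorem sortA_eq_ssort (arr : List Int) : sorting1DArray arr = ssort arr := by
  have := outer_bridge arr.length 0 arr (by omega)
  simpa [sorting1DArray, List.range_eq_range'] using this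

-- B is sorted and a permutation
theorem pvMerge_perm (xs ys : List Int) : List.Perm (pvMerge xs ys) (xs ++ ys) := by
  induction xs, ys using pvMerge.induct with
  | case1 ys => simp [pvMerge]
  | case2 x xs => simp [pvMerge]
  | case3 x xs y ys h ih => rw [pvMerge, if_pos h]; exact ih.cons x
  | case4 x xs y ys h ih =>
    rw [pvMerge, if_neg h]
    exact (ih.cons y).trans (List.perm_middle.symm)

theorem pvMerge_sorted {xs ys : List Int} (hx : List.Pairwise (· ≤ ·) xs)
    (hy : List.Pairwise (· ≤ ·) ys) : List.Pairwise (· ≤ ·) (pvMerge xs ys) := by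
  induction xs, ys using pvMerge.induct with
  | case1 ys => simpa [pvMerge] using hy
  | case2 x xs => simpa [pvMerge] using hx
  | case3 x xs y ys h ih =>
    rw [pvMerge, if_pos h]
    refine List.pairwise_cons.mpr ⟨?_, ih (List.pairwise_cons.mp hx).2 hy⟩
    intro b hb
    have := (pvMerge_perm xs (y :: ys)).mem_iff.mp hb
    rcases List.mem_append.mp this with hb | hb
    · exact (List.pairwise_cons.mp hx).1 b hb
    · rcases List.mem_cons.mp hb with rfl | hb
      · exact h
      · exact h.trans ((List.pairwise_cons.mp hy).1 b hb)
  | case4 x xs y ys h ih =>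
    rw [pvMerge, if_neg h]
    refine List.pairwise_cons.mpr ⟨?_, ih hx (List.pairwise_cons.mp hy).2⟩
    intro b hb
    have hyx : (y : Int) ≤ x := by omega
    have := (pvMerge_perm (x :: xs) ys).mem_iff.mp hb
    rcases List.mem_append.mp this with hb | hb
    · rcases List.mem_cons.mp hb with rfl | hb
      · exact hyx
      · exact hyx.trans ((List.pairwise_cons.mp hx).1 b hb)
    · exact (List.pairwise_cons.mp hy).1 b hb

theorem pvMsort_perm (l : List Int) : List.Perm (pvMsort l) l := by
  induction l using pvMsort.induct with
  | case1 l h => rw [pvMsort, dif_pos h]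
  | case2 l h ih1 ih2 =>
    rw [pvMsort, dif_neg h]
    refine (pvMerge_perm _ _).trans ?_
    refine (ih1.append ih2).trans ?_
    rw [List.take_append_drop]

theorem pvMsort_sorted (l : List Int) : List.Pairwise (· ≤ ·) (pvMsort l) := by
  induction l using pvMsort.induct with
  | case1 l h =>
    rw [pvMsort, dif_pos h]
    match l, h with
    | [], _ => exact List.Pairwise.nil
    | [x], _ => exact List.pairwise_singleton _ _
  | case2 l h ih1 ih2 => rw [pvMsort, dif_neg h]; exact pvMerge_sorted ih1 ih2

-- ===== VERDICT (by name: the statement is the Claim_ definition above) =====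
theorem sorting1DArray_spec : Claim_equal_sorting1DArray := by
  intro arr _ _
  unfold Spec_sorting1DArray sorting1DArray_alt
  rw [sortA_eq_ssort]
  exact List.Perm.eq_of_pairwise' (ssort_sorted arr) (pvMsort_sorted arr)
    ((ssort_perm arr).trans (pvMsort_perm arr).symm)
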